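-- pv_equiv track=rewrite | github.com/oss-materijali/vjezbe | SRC103-UUP/II.Kolokvij/warmup/16_vj2kol.py | function
-- ===== SOURCE A (Python) =====
-- def function(dict_a):
--     temp = 0
--     for k, v in dict_a.items():
--         for i in v:
--             if i > temp:
--                 temp = i
--         dict_a[k] = temp
--
--     return dict_a
-- ===== SOURCE B (Python) =====
-- def function(dict_a):
--     # per-key local maxima (0 is a neutral floor: the running max starts at 0)
--     tops = [max(v, default=0) for v in dict_a.values()]
--     # prefix-maximum scan over the local maxima
--     running = []
--     cur = 0
--     for m in tops:
--         cur = m if m > cur else cur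
--         running.append(cur)
--     # rebuild the mapping in key order (returns a new dict; A mutates in place)
--     return dict(zip(dict_a, running))
-- ===== Notes on version B (the rewrite author's own statement) =====
-- stated objective: alternative
-- what changed: A fuses everything into one nested loop that carries a running max and overwrites each dict value in place; B decomposes the task into a per-key local-maxima table (max(v, default=0)), a separate prefix-maximum scan over that table, and a rebuild of the mapping via dict(zip(...)), returning a fresh dict (A mutates and returns the argument; return values are identical).
import Mathlib
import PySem

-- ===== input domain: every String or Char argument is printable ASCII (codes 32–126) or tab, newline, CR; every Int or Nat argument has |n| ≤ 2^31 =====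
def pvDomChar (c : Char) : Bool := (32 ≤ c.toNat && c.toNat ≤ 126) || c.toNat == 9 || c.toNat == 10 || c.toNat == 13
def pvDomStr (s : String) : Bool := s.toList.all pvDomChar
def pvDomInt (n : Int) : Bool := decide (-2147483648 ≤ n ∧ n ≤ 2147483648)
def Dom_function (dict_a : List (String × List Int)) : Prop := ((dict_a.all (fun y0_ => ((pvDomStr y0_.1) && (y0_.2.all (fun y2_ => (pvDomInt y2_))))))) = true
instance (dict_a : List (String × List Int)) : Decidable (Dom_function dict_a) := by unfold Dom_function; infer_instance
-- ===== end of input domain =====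

-- B separates A's fused in-place loop into a local-max table, a prefix-max scan and a rebuild
-- (same return value; A mutates dict_a in place, B returns a fresh dict — return-value equivalence only).

-- ===== PORT A =====
-- fused loop: carry temp, take the inner running max over v, write it back at k
def functionGo (temp : Int) : List (String × List Int) → List (String × Int)
  | [] => []
  | (k, v) :: rest =>
      let t := v.foldl (fun t i => if i > t then i else t) temp
      (k, t) :: functionGo t rest

def function (dict_a : List (String × List Int)) : List (String × Int) :=
  functionGo 0 dict_a

-- ===== PORT B =====
def function_alt (dict_a : List (String × List Int)) : List (String × Int) :=
  -- tops = [max(v, default=0) for v in dict_a.values()]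
  let tops := dict_a.map (fun kv => (PySem.List.max? kv.2 (fun x => x)).getD 0)
  -- prefix-maximum scan: cur starts at 0, running collects each cur
  let running := (tops.foldl (fun (acc : List Int × Int) m =>
      let cur := if m > acc.2 then m else acc.2
      (acc.1 ++ [cur], cur)) ([], 0)).1
  -- dict(zip(dict_a, running))
  (dict_a.map Prod.fst).zip running

-- ===== PRECONDITION & SPEC =====
def Spec_function (dict_a : List (String × List Int)) (out : List (String × Int)) : Prop := out = function_alt dict_a
instance (dict_a : List (String × List Int)) (out : List (String × Int)) : Decidable (Spec_function dict_a out) := by unfold Spec_function; infer_instance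

-- ===== CLAIM (what is proved, stated in full; the proofs are below) =====
def Claim_equal_function : Prop := ∀ (dict_a : List (String × List Int)), Dom_function dict_a → Spec_function dict_a (function dict_a)

-- ===== LEMMAS AND PROOFS =====

-- recursive form of B's prefix-max scan
def scanGo (cur : Int) : List Int → List Int
  | [] => []
  | m :: rest =>
      let c := if m > cur then m else cur
      c :: scanGo c rest

theorem foldl_scan (l : List Int) : ∀ (xs : List Int) (cur : Int),
    (l.foldl (fun (acc : List Int × Int) m =>
      let c := if m > acc.2 then m else acc.2
      (acc.1 ++ [c], c)) (xs, cur)).1 = xs ++ scanGo cur l := by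
  induction l with
  | nil => intro xs cur; simp [scanGo]
  | cons m rest ih =>
      intro xs cur
      simp only [List.foldl_cons, scanGo, ih]
      simp

theorem foldl_max_shift (l : List Int) : ∀ (a b : Int),
    l.foldl max (max a b) = max a (l.foldl max b) := by
  induction l with
  | nil => intro a b; simp
  | cons c l ih =>
      intro a b
      simp only [List.foldl_cons]
      rw [max_assoc, ih]

-- A's inner loop equals "max temp (max(v, default=0))" whenever 0 ≤ temp
theorem inner_eq (v : List Int) (temp : Int) (h : 0 ≤ temp) :
    v.foldl (fun t i => if i > t then i else t) temp
      = (if ((PySem.List.max? v (fun x => x)).getD 0) > temp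
          then ((PySem.List.max? v (fun x => x)).getD 0) else temp) := by
  have hstep : (fun (t i : Int) => if i > t then i else t) = max := by
    funext t i
    by_cases hti : i > t
    · simp [hti, max_eq_right (le_of_lt hti)]
    · simp [hti, max_eq_left (le_of_not_gt hti)]
  cases v with
  | nil =>
      simp [PySem.List.max?]
      omega
  | cons x t =>
      rw [hstep, PySem.List.max?_id_cons]
      simp only [Option.getD_some]
      have : (x :: t).foldl max temp = max temp (t.foldl max x) := by
        simp only [List.foldl_cons]
        rw [show max temp x = max temp (max x x) by simp, foldl_max_shift]
        simp
      rw [this]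
      rcases le_or_gt (t.foldl max x) temp with hle | hlt
      · simp [max_eq_left hle, not_lt.mpr hle]
      · simp [max_eq_right (le_of_lt hlt), hlt]

-- main invariant: the fused loop equals zip of keys with the scan, for any start 0 ≤ temp
theorem go_eq (l : List (String × List Int)) : ∀ (temp : Int), 0 ≤ temp →
    functionGo temp l
      = (l.map Prod.fst).zip
          (scanGo temp (l.map (fun kv => (PySem.List.max? kv.2 (fun x => x)).getD 0))) := by
  induction l with
  | nil => intro temp _; simp [functionGo]
  | cons kv rest ih =>
      intro temp h
      obtain ⟨k, v⟩ := kv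
      simp only [functionGo, List.map_cons, scanGo, List.zip_cons_cons]
      rw [inner_eq v temp h]
      congr 1
      apply ih
      split <;> omega

-- ===== VERDICT (by name: the statement is the Claim_ definition above) =====
theorem function_spec : Claim_equal_function := by
  intro dict_a _
  unfold Spec_function function function_alt
  simp only [foldl_scan]
  simpa using go_eq dict_a 0 le_rfl
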